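-- pv_equiv track=rewrite | github.com/yms030808-code/Pictory-Develop | scripts/build_catalog_images.py | filter_titles_for_product
-- ===== SOURCE A (Python) =====
-- def filter_titles_for_product(pid: str, titles: list[str]) -> list[str]:
--     """검색 결과 중 모델과 맞는 파일명 우선."""
--     if pid == "ricoh-gr-iiix":
--         hit = [t for t in titles if "IIIx" in t or "GR IIIx" in t.replace("_", " ")]
--         return hit if hit else titles
--     if pid == "canon-g7x-mark-iii":
--         hit = [t for t in titles if "G7 X" in t and "Mark III" in t and "G5" not in t]
--         return hit if hit else titles
--     if pid == "dji-osmo-pocket-3":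
--         hit = [t for t in titles if "Osmo Pocket 3" in t and "Drama" not in t]
--         return hit if hit else titles
--     return titles
-- ===== SOURCE B (Python) =====
-- # Declarative rules: pid -> (required substrings, forbidden substrings).
-- # The ricoh rule needs only "IIIx": "GR IIIx" contains "IIIx", and since "IIIx"
-- # has no '_' or ' ', replacing '_' by ' ' cannot create or destroy an "IIIx"
-- # occurrence, so A's second disjunct is redundant.
-- _RULES = {
--     "ricoh-gr-iiix": (["IIIx"], []),
--     "canon-g7x-mark-iii": (["G7 X", "Mark III"], ["G5"]),
--     "dji-osmo-pocket-3": (["Osmo Pocket 3"], ["Drama"]),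
-- }
--
--
-- def filter_titles_for_product(pid: str, titles: list[str]) -> list[str]:
--     rule = _RULES.get(pid)
--     if rule is None:
--         return titles
--     must, ban = rule
--     hit = [t for t in titles
--            if all(m in t for m in must) and not any(b in t for b in ban)]
--     return hit if hit else titles
-- ===== Notes on version B (the rewrite author's own statement) =====
-- stated objective: simpler
-- what changed: Replaced the three hard-coded if-branches (each with its own boolean predicate, filter and fallback) by a small declarative rule table pid -> (required substrings, forbidden substrings) interpreted by one generic all/any pass; the ricoh rule drops A's redundant replace('_',' ') disjunct, since 'GR IIIx' contains 'IIIx' and 'IIIx' contains no '_' or ' ' the disjunction is provably equivalent to plain 'IIIx' in t.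
import Mathlib
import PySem

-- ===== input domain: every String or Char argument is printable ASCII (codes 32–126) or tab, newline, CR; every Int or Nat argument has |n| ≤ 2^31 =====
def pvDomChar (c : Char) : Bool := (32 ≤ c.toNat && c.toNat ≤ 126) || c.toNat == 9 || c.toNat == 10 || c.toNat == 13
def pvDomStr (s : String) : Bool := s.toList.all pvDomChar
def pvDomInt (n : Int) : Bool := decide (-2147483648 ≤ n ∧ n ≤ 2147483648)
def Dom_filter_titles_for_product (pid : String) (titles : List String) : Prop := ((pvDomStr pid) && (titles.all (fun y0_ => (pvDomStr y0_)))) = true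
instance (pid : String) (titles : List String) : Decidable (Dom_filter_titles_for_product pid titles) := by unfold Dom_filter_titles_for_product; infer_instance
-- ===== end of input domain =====

-- B replaces A's three hard-coded branches by a declarative rule table pid -> (required, forbidden
-- substrings) interpreted by one generic all/any pass; the ricoh rule provably drops A's redundant
-- replace('_',' ') disjunct. Objective: simpler.


-- ===== PORT A =====
def filter_titles_for_product (pid : String) (titles : List String) : List String :=
  if pid = "ricoh-gr-iiix" then
    let hit := titles.filter (fun t => PySem.Str.isIn "IIIx" t || PySem.Str.isIn "GR IIIx" (PySem.Str.replace t "_" " "))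
    if hit = [] then titles else hit
  else if pid = "canon-g7x-mark-iii" then
    let hit := titles.filter (fun t => PySem.Str.isIn "G7 X" t && PySem.Str.isIn "Mark III" t && !PySem.Str.isIn "G5" t)
    if hit = [] then titles else hit
  else if pid = "dji-osmo-pocket-3" then
    let hit := titles.filter (fun t => PySem.Str.isIn "Osmo Pocket 3" t && !PySem.Str.isIn "Drama" t)
    if hit = [] then titles else hit
  else titles

-- ===== PORT B =====
-- the module-level rule table _RULES : pid -> (required substrings, forbidden substrings)
def pvRules : PySem.Dict String (List String × List String) := ⟨
  [ ("ricoh-gr-iiix", (["IIIx"], []))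
  , ("canon-g7x-mark-iii", (["G7 X", "Mark III"], ["G5"]))
  , ("dji-osmo-pocket-3", (["Osmo Pocket 3"], ["Drama"])) ]⟩

def filter_titles_for_product_alt (pid : String) (titles : List String) : List String :=
  match PySem.Dict.get? pvRules pid with
  | none => titles
  | some (must, ban) =>
    let hit := titles.filter (fun t =>
      must.all (fun m => PySem.Str.isIn m t) && !(ban.any (fun b => PySem.Str.isIn b t)))
    if hit = [] then titles else hit

-- ===== PRECONDITION & SPEC =====
def Spec_filter_titles_for_product (pid : String) (titles : List String) (out : List String) : Prop := out = filter_titles_for_product_alt pid titles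
instance (pid : String) (titles : List String) (out : List String) : Decidable (Spec_filter_titles_for_product pid titles out) := by unfold Spec_filter_titles_for_product; infer_instance

-- ===== CLAIM =====
def Claim_equal_filter_titles_for_product : Prop := ∀ (pid : String) (titles : List String), Dom_filter_titles_for_product pid titles → Spec_filter_titles_for_product pid titles (filter_titles_for_product pid titles)

-- ===== LEMMAS AND PROOFS =====

-- '_' -> ' ' as a per-character map
def pvRepl (c : Char) : Char := if c = '_' then ' ' else c

-- replace.go with a one-char pattern and replacement is a character map
theorem pv_go_map (l : List Char) : ∀ (fuel : Nat) (acc : List Char), l.length ≤ fuel →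
    PySem.Chars.replace.go ['_'] [' '] fuel l acc = acc.reverse ++ l.map pvRepl := by
  induction l with
  | nil =>
    intro fuel acc _
    cases fuel <;> simp [PySem.Chars.replace.go]
  | cons c t ih =>
    intro fuel acc h
    cases fuel with
    | zero => simp at h
    | succ n =>
      simp only [PySem.Chars.replace.go]
      by_cases hc : c = '_'
      · subst hc
        rw [if_pos (by simp [List.isPrefixOf])]
        simp only [List.length_cons, List.length_nil, List.drop_succ_cons, List.drop_zero]
        rw [ih n ([' '].reverse ++ acc) (by simpa using h)]
        simp [pvRepl]
      · rw [if_neg (by simp [List.isPrefixOf, Ne.symm hc])]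
        rw [ih n (c :: acc) (by simpa using h)]
        simp [pvRepl, hc]

theorem pv_replace_map (s : List Char) : PySem.Chars.replace s "_".toList " ".toList = s.map pvRepl := by
  simp [PySem.Chars.replace]
  simpa using pv_go_map s s.length [] le_rfl

-- a space-free string is a fixed point of the map: its image occurrences are literal occurrences
theorem pv_map_repl_eq (m tgt : List Char) (h : ' ' ∉ tgt) (he : m.map pvRepl = tgt) : m = tgt := by
  induction m generalizing tgt with
  | nil => simpa using he.symm ▸ rfl
  | cons a as ih =>
    cases tgt with
    | nil => simp at he
    | cons b bs =>
      simp only [List.map_cons, List.cons.injEq] at he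
      simp only [List.mem_cons, not_or] at h
      obtain ⟨h1, h2⟩ := he
      have : a = b := by
        by_cases ha : a = '_'
        · exfalso; apply h.1; rw [← h1, pvRepl, if_pos ha]
        · rw [← h1, pvRepl, if_neg ha]
      rw [this, ih bs h.2 h2]

theorem pv_infix_map_repl {s : List Char} (h : "IIIx".toList <:+: s.map pvRepl) : "IIIx".toList <:+: s := by
  obtain ⟨pre, suf, hps⟩ := h
  rw [List.append_assoc] at hps
  obtain ⟨p1, rest, hs, hp1, hrest⟩ := List.map_eq_append_iff.mp hps.symm
  obtain ⟨m, s1, hr, hm, hs1⟩ := List.map_eq_append_iff.mp hrest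
  have hmv : m = "IIIx".toList := pv_map_repl_eq _ _ (by decide) hm
  exact ⟨p1, s1, by rw [hs, hr, hmv, List.append_assoc]⟩

-- A's ricoh disjunction collapses to the plain "IIIx" test
theorem pv_ricoh_pred (t : String) :
    (PySem.Str.isIn "IIIx" t || PySem.Str.isIn "GR IIIx" (PySem.Str.replace t "_" " ")) = PySem.Str.isIn "IIIx" t := by
  cases h : PySem.Str.isIn "IIIx" t
  · simp only [Bool.false_or]
    rw [Bool.eq_false_iff] at h ⊢
    intro hGR
    apply h
    rw [PySem.Str.isIn_iff_infix] at hGR ⊢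
    rw [PySem.Str.toList_replace, pv_replace_map] at hGR
    exact pv_infix_map_repl (List.IsInfix.trans (by decide) hGR)
  · simp

-- ===== VERDICT =====
theorem filter_titles_for_product_spec : Claim_equal_filter_titles_for_product := by
  intro pid titles _
  unfold Spec_filter_titles_for_product filter_titles_for_product filter_titles_for_product_alt
  by_cases h1 : pid = "ricoh-gr-iiix"
  · subst h1
    rw [if_pos rfl]
    have hg : PySem.Dict.get? pvRules "ricoh-gr-iiix" = some (["IIIx"], []) := by rfl
    rw [hg]
    simp only [List.all_cons, List.all_nil, List.any_nil, Bool.and_true, Bool.not_false]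
    rw [List.filter_congr (fun t _ => pv_ricoh_pred t)]
  by_cases h2 : pid = "canon-g7x-mark-iii"
  · subst h2
    rw [if_neg h1, if_pos rfl]
    have hg : PySem.Dict.get? pvRules "canon-g7x-mark-iii" = some (["G7 X", "Mark III"], ["G5"]) := by rfl
    rw [hg]
    simp [Bool.and_assoc]
  by_cases h3 : pid = "dji-osmo-pocket-3"
  · subst h3
    rw [if_neg h1, if_neg h2, if_pos rfl]
    have hg : PySem.Dict.get? pvRules "dji-osmo-pocket-3" = some (["Osmo Pocket 3"], ["Drama"]) := by rfl
    rw [hg]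
    simp
  rw [if_neg h1, if_neg h2, if_neg h3]
  have hg : PySem.Dict.get? pvRules pid = none := by
    simp only [pvRules, PySem.Dict.get?, List.find?,
      beq_eq_false_iff_ne.mpr (Ne.symm h1), beq_eq_false_iff_ne.mpr (Ne.symm h2),
      beq_eq_false_iff_ne.mpr (Ne.symm h3)]
    rfl
  rw [hg]
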